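-- pv_equiv track=rewrite | github.com/kwrobel-nlp/kftt | score_segmentation.py | get_input_unambig_offsets
-- ===== SOURCE A (Python) =====
-- from typing import List, Tuple
--
-- def get_input_unambig_offsets(paragraph: List[Tuple[str, int, int]]):
--     text = ''
--     unambig_offsets = []
--     last_offset = 0
--     prev_ambig = False
--     for token, ambig, decision in paragraph:
--         text += token
--         if ambig == 0:
--             if not prev_ambig:
--                 unambig_offsets.append((last_offset, last_offset + len(token)))
--             prev_ambig = False
--         else:
--             prev_ambig = True
--         last_offset += len(token)
--     return unambig_offsets, text
-- ===== SOURCE B (Python) =====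
-- def get_input_unambig_offsets(paragraph):
--     text = ''.join(tok for tok, _, _ in paragraph)
--     starts = [0]
--     for tok, _, _ in paragraph:
--         starts.append(starts[-1] + len(tok))
--     prev_ambigs = [0] + [ambig for _, ambig, _ in paragraph]
--     offsets = [(start, start + len(tok))
--                for (tok, ambig, _), prev, start in zip(paragraph, prev_ambigs, starts)
--                if ambig == 0 and prev == 0]
--     return offsets, text
-- ===== Notes on version B (the rewrite author's own statement) =====
-- stated objective: alternative
-- what changed: Replaces A's single running-state loop (text +=, last_offset, prev_ambig flag) with a join for the text, a precomputed table of start offsets, and a shifted-list zip so each token is judged against its predecessor's ambig value directly, with no mutable flag or running offset.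
import Mathlib
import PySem

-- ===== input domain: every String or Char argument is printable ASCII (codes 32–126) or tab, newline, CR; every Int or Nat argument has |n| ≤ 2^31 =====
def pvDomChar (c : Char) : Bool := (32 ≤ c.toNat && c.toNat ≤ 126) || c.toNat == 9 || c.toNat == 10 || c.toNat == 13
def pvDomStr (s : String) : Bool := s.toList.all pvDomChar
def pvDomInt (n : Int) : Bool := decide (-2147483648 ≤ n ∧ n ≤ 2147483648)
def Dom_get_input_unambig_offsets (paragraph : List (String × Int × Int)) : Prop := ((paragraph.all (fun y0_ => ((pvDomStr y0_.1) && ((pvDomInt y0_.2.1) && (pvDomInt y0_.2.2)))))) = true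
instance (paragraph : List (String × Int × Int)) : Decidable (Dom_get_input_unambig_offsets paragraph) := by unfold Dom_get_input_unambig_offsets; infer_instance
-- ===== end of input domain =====

-- B replaces A's running accumulators (text +=, last_offset, prev_ambig flag) by a join,
-- a precomputed start-offset table and a shifted-list zip (objective: alternative).

-- ===== PORT A =====
def get_input_unambig_offsets (paragraph : List (String × Int × Int)) : (List (Int × Int)) × String :=
  let r := paragraph.foldl
    (fun (st : List Char × List (Int × Int) × Int × Bool) tad =>
      let text := st.1 ++ tad.1.toList
      let lastOffset := st.2.2.1
      if tad.2.1 = 0 then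
        (text,
         (if st.2.2.2 = false then st.2.1 ++ [(lastOffset, lastOffset + PySem.Str.len tad.1)] else st.2.1),
         lastOffset + PySem.Str.len tad.1, false)
      else
        (text, st.2.1, lastOffset + PySem.Str.len tad.1, true))
    ([], [], 0, false)
  (r.2.1, String.ofList r.1)

-- ===== PORT B =====
def get_input_unambig_offsets_alt (paragraph : List (String × Int × Int)) : (List (Int × Int)) × String :=
  let text := String.ofList ((paragraph.map (fun t => t.1.toList)).flatten)
  let starts := paragraph.foldl
      (fun acc t => acc ++ [PySem.List.pyGetD acc (-1) 0 + PySem.Str.len t.1]) [(0 : Int)]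
  let prevAmbigs := (0 : Int) :: paragraph.map (fun t => t.2.1)
  let offsets := ((paragraph.zip prevAmbigs).zip starts).filterMap
      (fun x => if x.1.1.2.1 = 0 ∧ x.1.2 = 0
                then some (x.2, x.2 + PySem.Str.len x.1.1.1) else none)
  (offsets, text)

-- ===== PRECONDITION & SPEC =====
def Spec_get_input_unambig_offsets (paragraph : List (String × Int × Int)) (out : (List (Int × Int)) × String) : Prop := out = get_input_unambig_offsets_alt paragraph
instance (paragraph : List (String × Int × Int)) (out : (List (Int × Int)) × String) : Decidable (Spec_get_input_unambig_offsets paragraph out) := by unfold Spec_get_input_unambig_offsets; infer_instance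

-- ===== CLAIM (what is proved, stated in full; the proofs are below) =====
def Claim_equal_get_input_unambig_offsets : Prop := ∀ (paragraph : List (String × Int × Int)), Dom_get_input_unambig_offsets paragraph → Spec_get_input_unambig_offsets paragraph (get_input_unambig_offsets paragraph)

-- ===== LEMMAS AND PROOFS =====

-- the list of unambiguous spans, parametrised by the current offset and the previous token's ambiguity
def pvSegs : List (String × Int × Int) → Int → Bool → List (Int × Int)
  | [], _, _ => []
  | (t, a, _) :: rest, last, prev =>
    (if a = 0 ∧ prev = false then [(last, last + PySem.Str.len t)] else [])
      ++ pvSegs rest (last + PySem.Str.len t) (if a = 0 then false else true)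

-- start offsets of the tokens (plus the final end offset), from a given base
def pvStartsOf : List (String × Int × Int) → Int → List Int
  | [], s => [s]
  | t :: rest, s => s :: pvStartsOf rest (s + PySem.Str.len t.1)

lemma pvLoopA (para : List (String × Int × Int)) :
    ∀ (text : List Char) (offs : List (Int × Int)) (last : Int) (prev : Bool),
    para.foldl
      (fun (st : List Char × List (Int × Int) × Int × Bool) tad =>
        let text := st.1 ++ tad.1.toList
        let lastOffset := st.2.2.1
        if tad.2.1 = 0 then
          (text,
           (if st.2.2.2 = false then st.2.1 ++ [(lastOffset, lastOffset + PySem.Str.len tad.1)] else st.2.1),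
           lastOffset + PySem.Str.len tad.1, false)
        else
          (text, st.2.1, lastOffset + PySem.Str.len tad.1, true))
      (text, offs, last, prev)
    = (text ++ (para.map (fun (t : String × Int × Int) => t.1.toList)).flatten,
       offs ++ pvSegs para last prev,
       last + ((para.map (fun (t : String × Int × Int) => PySem.Str.len t.1)).sum),
       para.foldl (fun (_ : Bool) (tad : String × Int × Int) => if tad.2.1 = 0 then false else true) prev) := by
  induction para with
  | nil => intro text offs last prev; simp [pvSegs]
  | cons hd tl ih =>
    intro text offs last prev
    obtain ⟨t, a, d⟩ := hd
    by_cases ha : a = 0 <;> by_cases hp : prev = false <;>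
      simp only [List.foldl_cons, ha, hp, if_true, if_false, ih, pvSegs,
        List.map_cons, List.flatten_cons, List.sum_cons] <;>
      refine Prod.ext ?_ (Prod.ext ?_ (Prod.ext ?_ ?_)) <;>
      simp [hp] <;> ring

lemma pvStarts (para : List (String × Int × Int)) :
    ∀ (acc : List Int) (s : Int),
    para.foldl (fun acc (t : String × Int × Int) => acc ++ [PySem.List.pyGetD acc (-1) 0 + PySem.Str.len t.1]) (acc ++ [s])
    = acc ++ pvStartsOf para s := by
  induction para with
  | nil => intro acc s; simp [pvStartsOf]
  | cons hd tl ih =>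
    intro acc s
    simp only [List.foldl_cons, PySem.List.pyGetD_neg_one_append_singleton]
    rw [ih (acc ++ [s]) (s + PySem.Str.len hd.1)]
    simp [pvStartsOf]

lemma pvLoopB (para : List (String × Int × Int)) :
    ∀ (p s : Int),
    ((para.zip (p :: para.map (fun (t : String × Int × Int) => t.2.1))).zip (pvStartsOf para s)).filterMap
      (fun (x : ((String × Int × Int) × Int) × Int) => if x.1.1.2.1 = 0 ∧ x.1.2 = 0
                then some (x.2, x.2 + PySem.Str.len x.1.1.1) else none)
    = pvSegs para s (if p = 0 then false else true) := by
  induction para with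
  | nil => intro p s; simp [pvSegs]
  | cons hd tl ih =>
    intro p s
    obtain ⟨t, a, d⟩ := hd
    have h := ih a (s + PySem.Str.len t)
    by_cases hp : p = 0 <;> by_cases ha : a = 0 <;>
      simp [pvStartsOf, pvSegs, hp, ha] at h ⊢ <;> exact h

-- ===== VERDICT (by name: the statement is the Claim_ definition above) =====
theorem get_input_unambig_offsets_spec : Claim_equal_get_input_unambig_offsets := by
  intro paragraph _
  unfold Spec_get_input_unambig_offsets get_input_unambig_offsets get_input_unambig_offsets_alt
  simp only []
  rw [pvLoopA]
  have hs := pvStarts paragraph [] 0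
  simp only [List.nil_append] at hs
  rw [hs, pvLoopB]
  simp
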